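-- pv_equiv track=rewrite | github.com/Vikranth3140/linkedin-oa | 1.py | calculateTotalRegion
-- ===== SOURCE A (Python) =====
-- def calculateTotalRegion(heights):
--     n = len(heights)
--
--     # Arrays to store the farthest left and right boundary for each student
--     left = [0] * n
--     right = [0] * n
--
--     # Monotonic stack for the left boundaries
--     stack = []
--     for i in range(n):
--         # Find the farthest left where height is greater than or equal to current height
--         while stack and heights[stack[-1]] < heights[i]:
--             stack.pop()
--         if stack:
--             left[i] = stack[-1] + 1
--         else:
--             left[i] = 0  # No taller element on the left
--         stack.append(i)
--
--     # Clear the stack for the right boundary calculation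
--     stack.clear()
--
--     # Monotonic stack for the right boundaries
--     for i in range(n-1, -1, -1):
--         # Find the farthest right where height is greater than or equal to current height
--         while stack and heights[stack[-1]] < heights[i]:
--             stack.pop()
--         if stack:
--             right[i] = stack[-1] - 1
--         else:
--             right[i] = n - 1  # No taller element on the right
--         stack.append(i)
--
--     # Calculate the total sum of all regions
--     total_sum = 0
--     for i in range(n):
--         region_length = right[i] - left[i] + 1
--         total_sum += region_length
--
--     return total_sum
-- ===== SOURCE B (Python) =====
-- def calculateTotalRegion(heights):
--     n = len(heights)
--     total = 0
--     for i in range(n):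
--         j = i - 1
--         while j >= 0 and heights[j] < heights[i]:
--             j -= 1
--         k = i + 1
--         while k < n and heights[k] < heights[i]:
--             k += 1
--         total += (k - 1) - (j + 1) + 1
--     return total
-- ===== Notes on version B (the rewrite author's own statement) =====
-- stated objective: simpler
-- what changed: Replaces the two monotonic-stack passes and the left/right arrays with a single loop that, for each index, scans outward to the nearest neighbour of height >= heights[i] on each side and adds the region length directly.
import Mathlib
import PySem

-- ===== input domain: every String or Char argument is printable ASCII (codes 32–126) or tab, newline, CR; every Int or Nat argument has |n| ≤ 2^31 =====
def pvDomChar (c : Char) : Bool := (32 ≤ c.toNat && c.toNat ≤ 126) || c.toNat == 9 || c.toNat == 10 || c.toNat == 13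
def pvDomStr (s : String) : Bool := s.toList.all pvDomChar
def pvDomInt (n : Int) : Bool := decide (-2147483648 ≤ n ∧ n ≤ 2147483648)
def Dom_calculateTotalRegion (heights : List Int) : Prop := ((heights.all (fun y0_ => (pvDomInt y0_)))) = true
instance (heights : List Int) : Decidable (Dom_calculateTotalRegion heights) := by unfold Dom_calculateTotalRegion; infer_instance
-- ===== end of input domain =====

-- B replaces A's two monotonic-stack passes and left/right arrays with a single loop that,
-- for each index, scans outward to the nearest neighbour of height ≥ heights[i] on each side
-- (objective: simpler; not faster).

-- ===== PORT A =====
-- one iteration of the left-boundary loop: pop while heights[stack[-1]] < heights[i], read left[i], push i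
def stepL (heights : List Int) (s : List Nat × List Int) (i : Nat) : List Nat × List Int :=
  let st := s.1.dropWhile (fun j => heights.getD j 0 < heights.getD i 0)
  let l : Int := match st with
    | [] => 0
    | j :: _ => (j : Int) + 1
  (i :: st, s.2 ++ [l])

-- one iteration of the right-boundary loop (i descends, so right[i] is prepended)
def stepR (heights : List Int) (n : Nat) (s : List Nat × List Int) (i : Nat) : List Nat × List Int :=
  let st := s.1.dropWhile (fun j => heights.getD j 0 < heights.getD i 0)
  let r : Int := match st with
    | [] => (n : Int) - 1
    | j :: _ => (j : Int) - 1
  (i :: st, r :: s.2)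

def calculateTotalRegion (heights : List Int) : Int :=
  let n := heights.length
  let left := ((List.range n).foldl (stepL heights) ([], [])).2
  let right := ((List.range n).reverse.foldl (stepR heights n) ([], [])).2
  (List.range n).foldl (fun acc i => acc + (right.getD i 0 - left.getD i 0 + 1)) 0

-- ===== PORT B =====
-- 'j = i-1; while j >= 0 and heights[j] < x: j -= 1; result j+1' (argument is j+1; 0 = fell off)
def scanDown (h : List Int) (x : Int) : Nat → Int
  | 0 => 0
  | j + 1 => if h.getD j 0 < x then scanDown h x j else (j : Int) + 1

-- 'k = i+1; while k < n and heights[k] < x: k += 1; result k-1'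
def scanUp (h : List Int) (x : Int) (n : Nat) (k : Nat) : Int :=
  if k < n then
    (if h.getD k 0 < x then scanUp h x n (k + 1) else (k : Int) - 1)
  else (n : Int) - 1
termination_by n - k

def calculateTotalRegion_alt (heights : List Int) : Int :=
  let n := heights.length
  (List.range n).foldl (fun acc i =>
    acc + (scanUp heights (heights.getD i 0) n (i + 1)
            - scanDown heights (heights.getD i 0) i + 1)) 0

-- ===== PRECONDITION & SPEC =====
def Spec_calculateTotalRegion (heights : List Int) (out : Int) : Prop := out = calculateTotalRegion_alt heights
instance (heights : List Int) (out : Int) : Decidable (Spec_calculateTotalRegion heights out) := by unfold Spec_calculateTotalRegion; infer_instance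

-- ===== CLAIM (what is proved, stated in full; the proofs are below) =====
def Claim_equal_calculateTotalRegion : Prop := ∀ (heights : List Int), Dom_calculateTotalRegion heights → Spec_calculateTotalRegion heights (calculateTotalRegion heights)

-- ===== LEMMAS AND PROOFS =====

-- j survives the left pass up to i iff every k with j < k < i has height ≤ heights[j]
def goodL (h : List Int) (i j : Nat) : Bool :=
  decide (∀ k < i, j < k → h.getD k 0 ≤ h.getD j 0)

-- j survives the right pass down to m iff every k with m ≤ k < j has height ≤ heights[j]
def goodR (h : List Int) (m j : Nat) : Bool :=
  decide (∀ k < j, m ≤ k → h.getD k 0 ≤ h.getD j 0)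

-- the left stack after processing indices 0 … m-1 (top first)
def stkL (h : List Int) : Nat → List Nat
  | 0 => []
  | m + 1 => m :: (stkL h m).dropWhile (fun j => h.getD j 0 < h.getD m 0)

-- the right stack after processing d indices, n-1 down to n-d (top first)
def stkR (h : List Int) (n : Nat) : Nat → List Nat
  | 0 => []
  | d + 1 => (n - 1 - d) :: (stkR h n d).dropWhile (fun j => h.getD j 0 < h.getD (n - 1 - d) 0)

def leftVal (h : List Int) (i : Nat) : Int :=
  match (stkL h i).dropWhile (fun j => h.getD j 0 < h.getD i 0) with
  | [] => 0
  | j :: _ => (j : Int) + 1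

def rightVal (h : List Int) (n i : Nat) : Int :=
  match (stkR h n (n - 1 - i)).dropWhile (fun j => h.getD j 0 < h.getD i 0) with
  | [] => (n : Int) - 1
  | j :: _ => (j : Int) - 1

theorem dropWhile_eq_filter_not {α : Type} (p : α → Bool) (L : List α)
    (hmono : L.Pairwise (fun a b => p a = false → p b = false)) :
    L.dropWhile p = L.filter (fun j => !p j) := by
  induction L with
  | nil => rfl
  | cons a l ih =>
    rcases List.pairwise_cons.mp hmono with ⟨ha, hl⟩
    cases hpa : p a with
    | true => simp [List.dropWhile, List.filter, hpa, ih hl]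
    | false =>
      simp only [List.dropWhile, List.filter, hpa]
      simp only [Bool.not_false]
      rw [List.filter_eq_self.mpr]
      intro b hb
      simp [ha b hb hpa]

-- popping the left stack = filtering it by "height ≥ heights[i]"
theorem stkL_dropWhile (h : List Int) (i : Nat)
    (IH : stkL h i = ((List.range i).filter (goodL h i)).reverse) :
    (stkL h i).dropWhile (fun j => h.getD j 0 < h.getD i 0)
      = ((List.range i).filter
          (fun j => goodL h i j && !(h.getD j 0 < h.getD i 0))).reverse := by
  have hpw : (((List.range i).filter (goodL h i)).reverse).Pairwise
      (fun a b => (decide (h.getD a 0 < h.getD i 0)) = false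
                → (decide (h.getD b 0 < h.getD i 0)) = false) := by
    have h1 : (((List.range i).filter (goodL h i)).reverse).Pairwise (fun a b => b < a) :=
      List.pairwise_reverse.mpr ((List.pairwise_lt_range).filter _)
    refine h1.imp_of_mem ?_
    intro a b ha hb hba hpa
    simp only [List.mem_reverse, List.mem_filter, List.mem_range] at ha hb
    have hga : h.getD i 0 ≤ h.getD a 0 := by
      have := of_decide_eq_false hpa; omega
    have hgb : h.getD a 0 ≤ h.getD b 0 := by
      have := of_decide_eq_true hb.2
      exact this a ha.1 hba
    simp only [decide_eq_false_iff_not]; omega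
  rw [IH, dropWhile_eq_filter_not _ _ hpw, List.filter_reverse, List.filter_filter]
  congr 1
  apply List.filter_congr
  intro j _
  cases goodL h i j <;> cases hc : decide (h.getD j 0 < h.getD i 0) <;> simp

theorem stkL_eq (h : List Int) : ∀ m, stkL h m = ((List.range m).filter (goodL h m)).reverse := by
  intro m
  induction m with
  | zero => rfl
  | succ m ih =>
    have hstep := stkL_dropWhile h m ih
    have hgood_m : goodL h (m + 1) m = true := by
      simp only [goodL, decide_eq_true_eq]; intro k hk hmk; omega
    have hgood_lt : ∀ j ∈ List.range m,
        goodL h (m + 1) j = (goodL h m j && !(h.getD j 0 < h.getD m 0)) := by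
      intro j hj
      rw [List.mem_range] at hj
      simp only [goodL, ← decide_not, ← Bool.decide_and, decide_eq_decide]
      constructor
      · intro H
        refine ⟨fun k hk hjk => H k (by omega) hjk, ?_⟩
        have := H m (by omega) hj; omega
      · rintro ⟨H1, H2⟩ k hk hjk
        rcases Nat.lt_or_ge k m with hkm | hkm
        · exact H1 k hkm hjk
        · have : k = m := by omega
          subst this; omega
    show m :: (stkL h m).dropWhile (fun j => h.getD j 0 < h.getD m 0) = _
    rw [hstep, List.range_succ, List.filter_append, List.reverse_append]
    simp only [List.filter_cons, hgood_m]
    simp only [List.filter_nil]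
    congr 1
    congr 1
    exact (List.filter_congr hgood_lt).symm

-- scanDown finds the greatest j < i with height ≥ x
theorem scanDown_eq (h : List Int) (x : Int) : ∀ i, scanDown h x i
    = (match ((List.range i).filter (fun j => !(h.getD j 0 < x))).getLast? with
       | none => 0
       | some j => (j : Int) + 1) := by
  intro i
  induction i with
  | zero => rfl
  | succ i ih =>
    show (if h.getD i 0 < x then scanDown h x i else (i : Int) + 1) = _
    rw [List.range_succ, List.filter_append]
    simp only [List.filter_cons, List.filter_nil]
    by_cases hx : h.getD i 0 < x
    · have he : (if (!decide (h.getD i 0 < x)) = true then [i] else ([] : List Nat)) = [] := by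
        rw [decide_eq_true hx]; rfl
      rw [if_pos hx, he, List.append_nil]
      exact ih
    · have he : (if (!decide (h.getD i 0 < x)) = true then [i] else ([] : List Nat)) = [i] := by
        rw [decide_eq_false hx]; rfl
      rw [if_neg hx, he, List.getLast?_concat]

-- below the running maximum, the "survived the stack" filter does not change the last match
theorem last_filter_goodL (h : List Int) (i : Nat) : ∀ m, m ≤ i →
    (∀ k, m ≤ k → k < i → h.getD k 0 < h.getD i 0) →
    ((List.range m).filter (fun j => goodL h i j && !(h.getD j 0 < h.getD i 0))).getLast?
      = ((List.range m).filter (fun j => !(h.getD j 0 < h.getD i 0))).getLast? := by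
  intro m
  induction m with
  | zero => intro _ _; rfl
  | succ m ih =>
    intro hm H
    rw [List.range_succ, List.filter_append, List.filter_append]
    simp only [List.filter_cons, List.filter_nil]
    cases hc : decide (h.getD m 0 < h.getD i 0) with
    | true =>
      simp only [Bool.not_true, Bool.and_false, Bool.false_eq_true, if_false, List.append_nil]
      exact ih (by omega) (fun k hk1 hk2 => by
        rcases Nat.lt_or_ge k (m + 1) with hk | hk
        · have : k = m := by omega
          subst this; exact of_decide_eq_true hc
        · exact H k hk hk2)
    | false =>
      have hgood : goodL h i m = true := by
        simp only [goodL, decide_eq_true_eq]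
        intro k hk hmk
        have h1 := H k (by omega) hk
        have h2 := of_decide_eq_false hc
        omega
      simp only [hgood, Bool.not_false, Bool.and_true, if_true, List.getLast?_concat]

theorem leftVal_eq (h : List Int) (i : Nat) :
    leftVal h i = scanDown h (h.getD i 0) i := by
  unfold leftVal
  rw [stkL_dropWhile h i (stkL_eq h i), scanDown_eq,
    ← last_filter_goodL h i i (le_refl i) (fun k hk1 hk2 => by omega)]
  rcases hrev : ((List.range i).filter
      (fun j => goodL h i j && !(h.getD j 0 < h.getD i 0))).reverse with _ | ⟨j, t⟩
  · have : ((List.range i).filter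
        (fun j => goodL h i j && !(h.getD j 0 < h.getD i 0))) = [] := by
      rw [← List.reverse_reverse (List.filter _ _), hrev, List.reverse_nil]
    rw [this]; rfl
  · have : ((List.range i).filter
        (fun j => goodL h i j && !(h.getD j 0 < h.getD i 0))).getLast? = some j := by
      rw [← List.head?_reverse, hrev]; rfl
    rw [this]

-- ===== right-hand side, mirrored =====

theorem stkR_dropWhile (h : List Int) (n m : Nat) (d : Nat) (_hi : m + 1 = n - d) (_hd : d ≤ n)
    (IH : stkR h n d = (List.range' (n - d) d).filter (goodR h (n - d))) :
    (stkR h n d).dropWhile (fun j => h.getD j 0 < h.getD m 0)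
      = (List.range' (n - d) d).filter
          (fun j => goodR h (n - d) j && !(h.getD j 0 < h.getD m 0)) := by
  have hpw : (((List.range' (n - d) d).filter (goodR h (n - d)))).Pairwise
      (fun a b => (decide (h.getD a 0 < h.getD m 0)) = false
                → (decide (h.getD b 0 < h.getD m 0)) = false) := by
    have h1 : (((List.range' (n - d) d).filter (goodR h (n - d)))).Pairwise (· < ·) :=
      (List.pairwise_lt_range').filter _
    refine h1.imp_of_mem ?_
    intro a b ha hb hab hpa
    simp only [List.mem_filter, List.mem_range'] at ha hb
    have hga : h.getD m 0 ≤ h.getD a 0 := by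
      have := of_decide_eq_false hpa; omega
    have hgb : h.getD a 0 ≤ h.getD b 0 := by
      have := of_decide_eq_true hb.2
      refine this a hab ?_
      rcases ha.1 with ⟨_, _⟩; omega
    simp only [decide_eq_false_iff_not]; omega
  rw [IH, dropWhile_eq_filter_not _ _ hpw, List.filter_filter]
  apply List.filter_congr
  intro j _
  cases goodR h (n - d) j <;> cases hc : decide (h.getD j 0 < h.getD m 0) <;> simp

theorem stkR_eq (h : List Int) (n : Nat) : ∀ d, d ≤ n →
    stkR h n d = (List.range' (n - d) d).filter (goodR h (n - d)) := by
  intro d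
  induction d with
  | zero => intro _; rfl
  | succ d ih =>
    intro hd
    have hm : n - 1 - d + 1 = n - d := by omega
    have hstep := stkR_dropWhile h n (n - 1 - d) d hm (by omega) (ih (by omega))
    have hgood_m : goodR h (n - (d + 1)) (n - 1 - d) = true := by
      simp only [goodR, decide_eq_true_eq]; intro k hk1 hk2; omega
    have hgood_gt : ∀ j ∈ List.range' (n - d) d,
        goodR h (n - (d + 1)) j
          = (goodR h (n - d) j && !(h.getD j 0 < h.getD (n - 1 - d) 0)) := by
      intro j hj
      rw [List.mem_range'] at hj
      rcases hj with ⟨k, hk, rfl⟩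
      simp only [goodR, ← decide_not, ← Bool.decide_and, decide_eq_decide]
      constructor
      · intro H
        refine ⟨fun k' hk' hk'' => H k' hk' (by omega), ?_⟩
        have := H (n - 1 - d) (by omega) (by omega); omega
      · rintro ⟨H1, H2⟩ k' hk' hk''
        rcases Nat.lt_or_ge k' (n - d) with hkm | hkm
        · have : k' = n - 1 - d := by omega
          subst this; omega
        · exact H1 k' hk' hkm
    show (n - 1 - d) :: (stkR h n d).dropWhile (fun j => h.getD j 0 < h.getD (n - 1 - d) 0) = _
    have hr : List.range' (n - (d + 1)) (d + 1) = (n - 1 - d) :: List.range' (n - d) d := by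
      have h1 : n - (d + 1) = n - 1 - d := by omega
      rw [h1, List.range'_succ, hm]
    rw [hstep, hr]
    simp only [List.filter_cons, hgood_m]
    congr 1
    rw [List.filter_congr hgood_gt]

-- scanUp finds the least j ≥ k (below n) with height ≥ x
theorem scanUp_eq (h : List Int) (x : Int) (n : Nat) : ∀ d k, n - k = d → scanUp h x n k
    = (match ((List.range' k (n - k)).filter (fun j => !(h.getD j 0 < x))).head? with
       | none => (n : Int) - 1
       | some j => (j : Int) - 1) := by
  intro d
  induction d with
  | zero =>
    intro k hk
    rw [scanUp, if_neg (by omega), hk]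
    rfl
  | succ d ih =>
    intro k hk
    rw [scanUp, if_pos (by omega), hk, List.range'_succ]
    simp only [List.filter_cons]
    cases hc : decide (h.getD k 0 < x) with
    | true =>
      rw [if_pos (of_decide_eq_true hc)]
      rw [ih (k + 1) (by omega)]
      have hnk : n - (k + 1) = d := by omega
      rw [hnk]
      simp
    | false =>
      rw [if_neg (of_decide_eq_false hc)]
      simp

theorem head_filter_goodR (h : List Int) (i : Nat) : ∀ d k, i + 1 ≤ k →
    (∀ k', i + 1 ≤ k' → k' < k → h.getD k' 0 < h.getD i 0) →
    ((List.range' k d).filter (fun j => goodR h (i + 1) j && !(h.getD j 0 < h.getD i 0))).head?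
      = ((List.range' k d).filter (fun j => !(h.getD j 0 < h.getD i 0))).head? := by
  intro d
  induction d with
  | zero => intro _ _ _; rfl
  | succ d ih =>
    intro k hk H
    rw [List.range'_succ]
    simp only [List.filter_cons]
    cases hc : decide (h.getD k 0 < h.getD i 0) with
    | true =>
      simp only [Bool.not_true, Bool.and_false, Bool.false_eq_true, if_false]
      exact ih (k + 1) (by omega) (fun k' hk1 hk2 => by
        rcases Nat.lt_or_ge k' k with hx | hx
        · exact H k' hk1 hx
        · have : k' = k := by omega
          subst this; exact of_decide_eq_true hc)
    | false =>
      have hgood : goodR h (i + 1) k = true := by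
        simp only [goodR, decide_eq_true_eq]
        intro k' hk1 hk2
        have h1 := H k' hk2 hk1
        have h2 := of_decide_eq_false hc
        omega
      simp [hgood]

theorem rightVal_eq (h : List Int) (n i : Nat) (hi : i < n) :
    rightVal h n i = scanUp h (h.getD i 0) n (i + 1) := by
  unfold rightVal
  have hd : i + 1 = n - (n - 1 - i) := by omega
  have hdn : n - 1 - i ≤ n := by omega
  rw [scanUp_eq h (h.getD i 0) n (n - (i + 1)) (i + 1) rfl,
    stkR_dropWhile h n i (n - 1 - i) hd hdn (stkR_eq h n (n - 1 - i) hdn), ← hd]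
  have hlen : n - (i + 1) = n - 1 - i := by omega
  rw [hlen, ← head_filter_goodR h i (n - 1 - i) (i + 1) (le_refl _) (fun k' h1 h2 => by omega)]
  rcases hfl : (List.range' (i + 1) (n - 1 - i)).filter
      (fun j => goodR h (i + 1) j && !(h.getD j 0 < h.getD i 0)) with _ | ⟨j, t⟩ <;> rfl

-- ===== pass lemmas =====

theorem leftPass_eq (h : List Int) : ∀ m,
    (List.range m).foldl (stepL h) ([], []) = (stkL h m, (List.range m).map (leftVal h)) := by
  intro m
  induction m with
  | zero => rfl
  | succ m ih =>
    rw [List.range_succ, List.foldl_append, List.map_append, ih]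
    show stepL h _ m = _
    unfold stepL
    simp only []
    constructor

theorem rightPass_eq (h : List Int) (n : Nat) : ∀ d, d ≤ n →
    (List.range' (n - d) d).reverse.foldl (stepR h n) ([], [])
      = (stkR h n d, (List.range' (n - d) d).map (rightVal h n)) := by
  intro d
  induction d with
  | zero => intro _; rfl
  | succ d ih =>
    intro hd
    have hm : n - (d + 1) = n - 1 - d := by omega
    have hr : List.range' (n - (d + 1)) (d + 1) = (n - 1 - d) :: List.range' (n - d) d := by
      have h1 : n - 1 - d + 1 = n - d := by omega
      rw [hm, List.range'_succ, h1]
    rw [hr, List.reverse_cons, List.foldl_append, ih (by omega)]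
    show stepR h n _ (n - 1 - d) = _
    unfold stepR
    simp only [List.map_cons]
    have hv : rightVal h n (n - 1 - d)
        = (match (stkR h n d).dropWhile
              (fun j => h.getD j 0 < h.getD (n - 1 - d) 0) with
           | [] => (n : Int) - 1
           | j :: _ => (j : Int) - 1) := by
      unfold rightVal
      have : n - 1 - (n - 1 - d) = d := by omega
      rw [this]
    rw [hv]
    rfl

theorem map_range_getD (f : Nat → Int) (n i : Nat) (hi : i < n) :
    ((List.range n).map f).getD i 0 = f i := by
  rw [List.getD_eq_getElem?_getD, List.getElem?_map, List.getElem?_range hi]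
  rfl

-- ===== VERDICT (by name: the statement is the Claim_ definition above) =====
theorem calculateTotalRegion_spec : Claim_equal_calculateTotalRegion := by
  intro heights _
  unfold Spec_calculateTotalRegion calculateTotalRegion calculateTotalRegion_alt
  simp only []
  have hright : (List.range heights.length).reverse.foldl (stepR heights heights.length) ([], [])
      = (stkR heights heights.length heights.length,
         (List.range heights.length).map (rightVal heights heights.length)) := by
    have := rightPass_eq heights heights.length heights.length (le_refl _)
    rwa [Nat.sub_self, ← List.range_eq_range'] at this
  rw [leftPass_eq, hright]
  refine PySem.List.foldl_congr_mem _ _ _ _ ?_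
  intro acc i hi
  rw [List.mem_range] at hi
  rw [map_range_getD _ _ _ hi, map_range_getD _ _ _ hi, leftVal_eq,
    rightVal_eq heights heights.length i hi]
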